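-- pv_equiv track=rewrite | github.com/onitgnal/Herriott-Cell-Configurator | backend/app/core/wave_optics.py | _efficient_grid_size
-- ===== SOURCE A (Python) =====
-- FAST_GRID_SIZES = (
--     32,
--     40,
--     48,
--     56,
--     64,
--     72,
--     80,
--     96,
--     112,
--     128,
--     144,
--     160,
--     192,
--     224,
--     256,
--     320,
--     384,
--     448,
--     512,
--     640,
--     768,
--     896,
--     1024,
-- )
--
-- class WaveOpticsSamplingError(ValueError):
--     pass
--
-- def _efficient_grid_size(required_points: int, max_grid_points: int) -> int:
--     for size in FAST_GRID_SIZES: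
--         if size >= required_points and size <= max_grid_points:
--             return size
--     if required_points <= max_grid_points:
--         return required_points
--     raise WaveOpticsSamplingError(
--         f"Wave-optics sampling would require {required_points} points on one axis, exceeding the configured "
--         f"limit of {max_grid_points}. Increase the grid limit or relax the sampling margins.",
--     )
-- ===== SOURCE B (Python) =====
-- import bisect
--
-- FAST_GRID_SIZES = (
--     32, 40, 48, 56, 64, 72, 80, 96, 112, 128, 144, 160, 192, 224,
--     256, 320, 384, 448, 512, 640, 768, 896, 1024,
-- )
--
-- class WaveOpticsSamplingError(ValueError):
--     pass
--
-- def _efficient_grid_size(required_points: int, max_grid_points: int) -> int: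
--     # FAST_GRID_SIZES is strictly increasing, so the first size >= required_points
--     # (found by binary search) is the only candidate that could also fit the limit.
--     idx = bisect.bisect_left(FAST_GRID_SIZES, required_points)
--     if idx < len(FAST_GRID_SIZES) and FAST_GRID_SIZES[idx] <= max_grid_points:
--         return FAST_GRID_SIZES[idx]
--     if required_points <= max_grid_points:
--         return required_points
--     raise WaveOpticsSamplingError(
--         f"Wave-optics sampling would require {required_points} points on one axis, exceeding the configured "
--         f"limit of {max_grid_points}. Increase the grid limit or relax the sampling margins.",
--     )
-- ===== Notes on version B (the rewrite author's own statement) =====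
-- stated objective: idiomatic
-- what changed: Replaces the linear scan of FAST_GRID_SIZES with a binary search (bisect_left) for the first size >= required_points, exploiting that the table is strictly increasing so no other entry can qualify.
import Mathlib
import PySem

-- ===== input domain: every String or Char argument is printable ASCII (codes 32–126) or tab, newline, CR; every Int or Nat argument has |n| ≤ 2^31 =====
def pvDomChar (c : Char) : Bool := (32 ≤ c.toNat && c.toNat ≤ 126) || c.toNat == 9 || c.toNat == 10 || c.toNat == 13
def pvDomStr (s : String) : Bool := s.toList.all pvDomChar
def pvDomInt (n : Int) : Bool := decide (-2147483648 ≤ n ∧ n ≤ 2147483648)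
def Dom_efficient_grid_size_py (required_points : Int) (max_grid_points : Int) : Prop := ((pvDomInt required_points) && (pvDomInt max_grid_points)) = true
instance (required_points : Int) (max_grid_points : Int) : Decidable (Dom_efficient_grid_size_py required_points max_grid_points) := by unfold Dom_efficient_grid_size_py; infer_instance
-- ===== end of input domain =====

-- B replaces A's linear scan of the size table with a bisect_left binary search (more idiomatic).
-- Equivalence is about the return value; on required_points > max_grid_points both Pythons raise
-- WaveOpticsSamplingError (excluded by Pre_).

def fastGridSizes : List Int :=
  [32, 40, 48, 56, 64, 72, 80, 96, 112, 128, 144, 160, 192, 224,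
   256, 320, 384, 448, 512, 640, 768, 896, 1024]

-- ===== PORT A =====
-- the 'for size in FAST_GRID_SIZES' loop with early return
def scanA (xs : List Int) (required_points max_grid_points : Int) : Option Int :=
  match xs with
  | [] => none
  | s :: rest =>
      if s ≥ required_points ∧ s ≤ max_grid_points then some s
      else scanA rest required_points max_grid_points

def efficient_grid_size_py (required_points : Int) (max_grid_points : Int) : Int :=
  match scanA fastGridSizes required_points max_grid_points with
  | some s => s
  | none =>
      if required_points ≤ max_grid_points then required_points
      else 0  -- raise WaveOpticsSamplingError: excluded by Pre_

-- ===== PORT B =====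
-- bisect.bisect_left on the list (hand-ported binary search, exact)
def bisectGo (xs : List Int) (x : Int) (lo hi : Nat) : Nat :=
  if h : lo < hi then
    let mid := (lo + hi) / 2
    if xs.getD mid 0 < x then bisectGo xs x (mid + 1) hi
    else bisectGo xs x lo mid
  else lo
termination_by hi - lo
decreasing_by all_goals omega

def efficient_grid_size_py_alt (required_points : Int) (max_grid_points : Int) : Int :=
  let idx := bisectGo fastGridSizes required_points 0 fastGridSizes.length
  if idx < fastGridSizes.length ∧ fastGridSizes.getD idx 0 ≤ max_grid_points then
    fastGridSizes.getD idx 0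
  else if required_points ≤ max_grid_points then required_points
  else 0  -- raise WaveOpticsSamplingError: excluded by Pre_

-- ===== PRECONDITION & SPEC =====
-- A raises WaveOpticsSamplingError exactly when required_points > max_grid_points
-- (any table entry satisfying the loop's test already forces required_points ≤ max_grid_points).
def Pre_efficient_grid_size_py (required_points : Int) (max_grid_points : Int) : Prop :=
  required_points ≤ max_grid_points
instance (required_points : Int) (max_grid_points : Int) : Decidable (Pre_efficient_grid_size_py required_points max_grid_points) := by unfold Pre_efficient_grid_size_py; infer_instance

def pvWitness_efficient_grid_size_py : Int × Int := (100, 200)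

def Spec_efficient_grid_size_py (required_points : Int) (max_grid_points : Int) (out : Int) : Prop := out = efficient_grid_size_py_alt required_points max_grid_points
instance (required_points : Int) (max_grid_points : Int) (out : Int) : Decidable (Spec_efficient_grid_size_py required_points max_grid_points out) := by unfold Spec_efficient_grid_size_py; infer_instance

-- ===== CLAIM (what is proved, stated in full; the proofs are below) =====
def Claim_equal_efficient_grid_size_py : Prop := ∀ (required_points : Int) (max_grid_points : Int), Dom_efficient_grid_size_py required_points max_grid_points → Pre_efficient_grid_size_py required_points max_grid_points → Spec_efficient_grid_size_py required_points max_grid_points (efficient_grid_size_py required_points max_grid_points)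

-- ===== LEMMAS AND PROOFS =====

-- the for-loop of A is List.find? with the loop's test
theorem scanA_eq_find? (xs : List Int) (r m : Int) :
    scanA xs r m = xs.find? (fun s => decide (r ≤ s ∧ s ≤ m)) := by
  induction xs with
  | nil => rfl
  | cons s rest ih =>
      by_cases h : r ≤ s ∧ s ≤ m
      · simp [scanA, List.find?, h]
      · simp only [scanA, List.find?, ge_iff_le]
        rw [if_neg h, ih]
        simp [h]

theorem getD_mono (xs : List Int) (h : List.Pairwise (· ≤ ·) xs) (i j : Nat)
    (hij : i ≤ j) (hj : j < xs.length) : xs.getD i 0 ≤ xs.getD j 0 := by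
  rcases Nat.lt_or_ge i j with hlt | hge
  · have := (List.pairwise_iff_getElem.mp h) i j (Nat.lt_trans hlt hj) hj hlt
    rwa [List.getD_eq_getElem xs 0 (Nat.lt_trans hlt hj), List.getD_eq_getElem xs 0 hj]
  · have : i = j := Nat.le_antisymm hij hge
    simp [this]

theorem bisectGo_eq (xs : List Int) (x : Int) (lo hi : Nat) (h : lo < hi) :
    bisectGo xs x lo hi =
      if xs.getD ((lo + hi) / 2) 0 < x then bisectGo xs x ((lo + hi) / 2 + 1) hi
      else bisectGo xs x lo ((lo + hi) / 2) := by
  rw [bisectGo]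
  simp [h]

theorem bisect_inv (xs : List Int) (x : Int) (hs : List.Pairwise (· ≤ ·) xs) :
    ∀ lo hi : Nat, lo ≤ hi → hi ≤ xs.length →
    (∀ i, i < lo → xs.getD i 0 < x) →
    (∀ i, hi ≤ i → i < xs.length → x ≤ xs.getD i 0) →
    lo ≤ bisectGo xs x lo hi ∧ bisectGo xs x lo hi ≤ hi ∧
    (∀ i, i < bisectGo xs x lo hi → xs.getD i 0 < x) ∧
    (∀ i, bisectGo xs x lo hi ≤ i → i < xs.length → x ≤ xs.getD i 0) := by
  intro lo hi
  induction lo, hi using bisectGo.induct xs x with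
  | case1 lo hi h mid hlt ih =>
      intro hlohi hhi hlo hhi2
      have hmideq : mid = (lo + hi) / 2 := rfl
      rw [bisectGo_eq xs x lo hi h, ← hmideq, if_pos hlt]
      have hmid : mid < hi := by omega
      have ih' := ih (by omega) hhi
        (fun i hi' => by
          have hle : xs.getD i 0 ≤ xs.getD mid 0 :=
            getD_mono xs hs i mid (by omega) (by omega)
          omega)
        hhi2
      exact ⟨by omega, ih'.2.1, ih'.2.2.1, ih'.2.2.2⟩
  | case2 lo hi h mid hlt ih =>
      intro hlohi hhi hlo hhi2
      have hmideq : mid = (lo + hi) / 2 := rfl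
      rw [bisectGo_eq xs x lo hi h, ← hmideq, if_neg hlt]
      have hmid : mid < hi := by omega
      have ih' := ih (by omega) (by omega) hlo
        (fun i hi' hilen => by
          rcases Nat.lt_or_ge i hi with hi2 | hi2
          · have hle : xs.getD mid 0 ≤ xs.getD i 0 :=
              getD_mono xs hs mid i (by omega) (by omega)
            omega
          · exact hhi2 i hi2 hilen)
      exact ⟨ih'.1, by omega, ih'.2.2.1, ih'.2.2.2⟩
  | case3 lo hi h =>
      intro hlohi hhi hlo hhi2
      rw [bisectGo]
      rw [dif_neg h]
      exact ⟨le_rfl, hlohi, hlo, fun i hi' hilen => hhi2 i (by omega) hilen⟩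

theorem find?_at (p : Int → Bool) (xs : List Int) (k : Nat) (hk : k < xs.length)
    (hfail : ∀ i, i < k → p (xs.getD i 0) = false) (hp : p (xs.getD k 0) = true) :
    xs.find? p = some (xs.getD k 0) := by
  induction xs generalizing k with
  | nil => simp at hk
  | cons a l ih =>
      cases k with
      | zero =>
          simp only [List.getD_cons_zero] at hp
          simp [List.find?, hp]
      | succ k =>
          have h0 : p a = false := by
            have := hfail 0 (by omega)
            simpa using this
          simp only [List.find?, h0, List.getD_cons_succ]
          exact ih k (by simpa using hk)
            (fun i hi' => by
              have := hfail (i + 1) (by omega)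
              simpa using this)
            (by simpa using hp)

theorem find?_none (p : Int → Bool) (xs : List Int)
    (hfail : ∀ i, i < xs.length → p (xs.getD i 0) = false) :
    xs.find? p = none := by
  rw [List.find?_eq_none]
  intro x hx
  obtain ⟨i, hi, hxi⟩ := List.mem_iff_getElem.mp hx
  have := hfail i hi
  rw [List.getD_eq_getElem xs 0 hi, hxi] at this
  simp [this]

-- ===== VERDICT (by name: the statement is the Claim_ definition above) =====
theorem efficient_grid_size_py_spec : Claim_equal_efficient_grid_size_py := by
  intro r m _ hpre
  unfold Pre_efficient_grid_size_py at hpre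
  have hs : List.Pairwise (· ≤ ·) fastGridSizes := by decide
  obtain ⟨h1, h2, h3, h4⟩ := bisect_inv fastGridSizes r hs 0 fastGridSizes.length
    (Nat.zero_le _) le_rfl (fun i hi => by omega) (fun i hi hilen => by omega)
  unfold Spec_efficient_grid_size_py efficient_grid_size_py efficient_grid_size_py_alt
  rw [scanA_eq_find?]
  set k := bisectGo fastGridSizes r 0 fastGridSizes.length with hkdef
  by_cases hklen : k < fastGridSizes.length
  · by_cases hm : fastGridSizes.getD k 0 ≤ m
    · have hfind : fastGridSizes.find? (fun s => decide (r ≤ s ∧ s ≤ m)) =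
          some (fastGridSizes.getD k 0) := by
        apply find?_at _ _ k hklen
        · intro i hik
          have := h3 i hik
          simp only [decide_eq_false_iff_not, not_and, not_le]
          omega
        · have := h4 k le_rfl hklen
          simp only [decide_eq_true_eq]
          exact ⟨this, hm⟩
      rw [hfind]
      simp [hklen]
      intro hcon
      rw [List.getD_eq_getElem _ _ hklen] at hm
      exact absurd hcon (not_lt.mpr hm)
    · have hfind : fastGridSizes.find? (fun s => decide (r ≤ s ∧ s ≤ m)) = none := by
        apply find?_none
        intro i hi
        rcases Nat.lt_or_ge i k with hik | hik
        · have := h3 i hik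
          simp only [decide_eq_false_iff_not, not_and, not_le]
          omega
        · have hle : fastGridSizes.getD k 0 ≤ fastGridSizes.getD i 0 :=
            getD_mono fastGridSizes hs k i hik hi
          simp only [decide_eq_false_iff_not, not_and, not_le]
          omega
      rw [hfind]
      simp [hpre]
      intro _ hc
      rw [List.getD_eq_getElem?_getD] at hm
      exact absurd hc hm
  · have hfind : fastGridSizes.find? (fun s => decide (r ≤ s ∧ s ≤ m)) = none := by
      apply find?_none
      intro i hi
      have := h3 i (by omega)
      simp only [decide_eq_false_iff_not, not_and, not_le]
      omega
    rw [hfind]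
    simp [hklen, hpre]
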